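-- pv_equiv track=rewrite | github.com/hokaso/hocassian-media-matrix | matrix-python-project/cover_generator/typesetting/select_algorithm.py | find_right_one
-- ===== SOURCE A (Python) =====
-- def find_right_one(num):
--     if num == 0:
--         return -1
--     i = 0
--     while num:
--         if num & 1:
--             return i
--         num >>= 1
--         i += 1
-- ===== SOURCE B (Python) =====
-- def find_right_one(num):
--     low = num & -num
--     return low.bit_length() - 1
-- ===== Notes on version B (the rewrite author's own statement) =====
-- stated objective: idiomatic
-- what changed: Replaced the bit-by-bit shifting loop with the closed-form bit-twiddle (num & -num).bit_length() - 1, which isolates the lowest set bit and reads off its index; num == 0 yields -1 without a special case.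
import Mathlib
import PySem

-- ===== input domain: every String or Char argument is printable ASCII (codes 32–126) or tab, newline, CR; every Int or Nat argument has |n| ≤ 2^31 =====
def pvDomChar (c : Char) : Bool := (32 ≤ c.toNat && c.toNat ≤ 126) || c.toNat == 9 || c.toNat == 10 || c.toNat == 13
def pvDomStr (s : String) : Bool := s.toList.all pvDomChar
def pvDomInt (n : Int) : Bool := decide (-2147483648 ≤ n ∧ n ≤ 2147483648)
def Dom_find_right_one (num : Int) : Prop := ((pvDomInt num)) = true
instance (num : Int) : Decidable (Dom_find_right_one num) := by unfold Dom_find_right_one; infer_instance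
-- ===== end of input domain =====

-- B replaces A's bit-by-bit shifting loop with the closed-form (num & -num).bit_length() - 1 (idiomatic; same return values, including -1 for 0).

-- ===== PORT A =====
-- the while loop: `while num: if num & 1: return i; num >>= 1; i += 1`
-- (the loop-exit fall-off, Python's implicit `return None`, is unreachable: the loop is only
--  entered with num ≠ 0 and halving an even nonzero int never yields 0 before an odd value)
def find_right_one_loop (num i : Int) : Int :=
  if _h0 : num = 0 then -1  -- unreachable fall-off (Python: return None)
  else if PySem.Int.band num 1 ≠ 0 then i
  else find_right_one_loop (num >>> (1 : Nat)) (i + 1)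
termination_by num.natAbs
decreasing_by
  have hb : PySem.Int.band num 1 = PySem.Int.mod num 2 := PySem.Int.band_one num
  have hm : PySem.Int.mod num 2 = num % 2 := PySem.Int.mod_eq_emod_of_pos (by omega)
  have hsh : num >>> (1 : Nat) = num / 2 := by
    have := Int.shiftRight_eq_div_pow num 1
    simpa using this
  rw [hsh]
  omega

def find_right_one (num : Int) : Int :=
  if num = 0 then -1
  else find_right_one_loop num 0

-- ===== PORT B =====
def find_right_one_alt (num : Int) : Int :=
  let low := PySem.Int.band num (-num)
  ((PySem.Int.bitLength low : Int)) - 1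

-- ===== PRECONDITION & SPEC =====
def Spec_find_right_one (num : Int) (out : Int) : Prop := out = find_right_one_alt num
instance (num : Int) (out : Int) : Decidable (Spec_find_right_one num out) := by unfold Spec_find_right_one; infer_instance

-- ===== CLAIM (what is proved, stated in full; the proofs are below) =====
def Claim_equal_find_right_one : Prop := ∀ (num : Int), Dom_find_right_one num → Spec_find_right_one num (find_right_one num)

-- ===== LEMMAS AND PROOFS =====

-- (2k+1) &&& 2k = 2k : an odd number keeps all the bits of its predecessor
lemma odd_and_pred (k : Nat) : (2 * k + 1) &&& (2 * k) = 2 * k := by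
  apply Nat.eq_of_testBit_eq
  intro i
  cases i with
  | zero => simp [Nat.testBit_zero, Nat.mul_mod_right]
  | succ j =>
      rw [Nat.testBit_land, Nat.testBit_add_one, Nat.testBit_add_one]
      have h1 : (2 * k + 1) / 2 = k := by omega
      have h2 : (2 * k) / 2 = k := by omega
      rw [h1, h2, Bool.and_self]

-- (2a) &&& (2a-1) = 2 * (a &&& (a-1)) for a > 0
lemma even_and_pred (a : Nat) (ha : 0 < a) : (2 * a) &&& (2 * a - 1) = 2 * (a &&& (a - 1)) := by
  apply Nat.eq_of_testBit_eq
  intro i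
  cases i with
  | zero => simp [Nat.testBit_zero, Nat.mul_mod_right]
  | succ j =>
      rw [Nat.testBit_land, Nat.testBit_add_one, Nat.testBit_add_one, Nat.testBit_add_one]
      have h1 : (2 * a) / 2 = a := by omega
      have h2 : (2 * a - 1) / 2 = a - 1 := by omega
      have h3 : (2 * (a &&& (a - 1))) / 2 = a &&& (a - 1) := by omega
      rw [h1, h2, h3, Nat.testBit_land]

-- Python's num & -num, written through |num|: it equals |num| - (|num| &&& (|num|-1))
lemma band_neg_self (num : Int) (h : num ≠ 0) :
    PySem.Int.band num (-num) = ((num.natAbs - (num.natAbs &&& (num.natAbs - 1)) : Nat) : Int) := by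
  rcases lt_or_gt_of_ne h with hneg | hpos
  · unfold PySem.Int.band
    rw [if_neg (by omega), if_pos (by omega)]
    have h1 : (-num).toNat = num.natAbs := by omega
    have h2 : (-num - 1).toNat = num.natAbs - 1 := by omega
    rw [h1, h2]
  · unfold PySem.Int.band
    rw [if_pos (by omega), if_neg (by omega)]
    have h1 : num.toNat = num.natAbs := by omega
    have h2 : (- -num - 1).toNat = num.natAbs - 1 := by omega
    rw [h1, h2]

lemma bitLength_two_mul (x : Nat) (hx : 0 < x) :
    PySem.Int.bitLength ((2 * x : Nat) : Int) = PySem.Int.bitLength ((x : Nat) : Int) + 1 := by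
  have := PySem.Int.bitLength_natCast (m := 2 * x) (by omega)
  have h2 : (2 * x) / 2 = x := by omega
  rw [h2] at this
  exact this

-- the loop computes i + (bit_length of the isolated low bit of |num|) - 1
lemma loop_eq (m : Nat) : ∀ (num i : Int), num ≠ 0 → num.natAbs = m →
    find_right_one_loop num i =
      i + (((PySem.Int.bitLength ((m - (m &&& (m - 1)) : Nat) : Int)) : Int) - 1) := by
  induction m using Nat.strong_induction_on with
  | _ m ih =>
    intro num i h0 hm
    have hb : PySem.Int.band num 1 = num % 2 := by
      rw [PySem.Int.band_one, PySem.Int.mod_eq_emod_of_pos (by omega)]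
    rw [find_right_one_loop, dif_neg h0]
    rcases Nat.even_or_odd m with he | ho
    · -- even case: recurse on num / 2
      obtain ⟨a, ha⟩ := he
      have ha' : m = 2 * a := by omega
      have hapos : 0 < a := by
        rcases Nat.eq_zero_or_pos a with h | h
        · exfalso; apply h0; omega
        · exact h
      have hcond : PySem.Int.band num 1 = 0 := by rw [hb]; omega
      rw [if_neg (by simp [hcond])]
      have hsh : num >>> (1 : Nat) = num / 2 := by
        have := Int.shiftRight_eq_div_pow num 1
        simpa using this
      have hne : num / 2 ≠ 0 := by omega
      have hna : (num / 2).natAbs = a := by omega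
      rw [hsh, ih a (by omega) (num / 2) (i + 1) hne hna]
      have hand : (2 * a) &&& (2 * a - 1) = 2 * (a &&& (a - 1)) := even_and_pred a hapos
      have hle : a &&& (a - 1) ≤ a - 1 := Nat.and_le_right
      have hsub : m - (m &&& (m - 1)) = 2 * (a - (a &&& (a - 1))) := by
        rw [ha', hand]; omega
      have hpos' : 0 < a - (a &&& (a - 1)) := by omega
      rw [hsub, bitLength_two_mul _ hpos']
      push_cast
      ring
    · -- odd case: return i
      obtain ⟨k, hk⟩ := ho
      have hcond : PySem.Int.band num 1 = 1 := by rw [hb]; omega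
      rw [if_pos (by simp [hcond])]
      have hand : m &&& (m - 1) = m - 1 := by
        have := odd_and_pred k
        have h1 : m - 1 = 2 * k := by omega
        rw [hk, h1] at *
        simpa [h1] using this
      have h1 : m - (m &&& (m - 1)) = 1 := by rw [hand]; omega
      have hb1 : ((PySem.Int.bitLength ((1 : Nat) : Int) : Int)) = 1 := by decide
      rw [h1, hb1]
      ring

-- ===== VERDICT (by name: the statement is the Claim_ definition above) =====
theorem find_right_one_spec : Claim_equal_find_right_one := by
  unfold Claim_equal_find_right_one
  intro num _
  unfold Spec_find_right_one find_right_one find_right_one_alt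
  by_cases h0 : num = 0
  · subst h0; decide
  · rw [if_neg h0, loop_eq num.natAbs num 0 h0 rfl, band_neg_self num h0]
    ring
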